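-- pv_equiv track=rewrite | github.com/Hwang-Junsu/Coding_Test | Implementation/programmers/Lv.3/풍선 터뜨리기(미완).py | solution
-- ===== SOURCE A (Python) =====
-- def solution(a):
--     answer = 2
--     left = a[0]
--     right = a[len(a)-1]
--
--     for i in range(1,len(a)-1) :
--         if left < a[i] :
--             answer += 1
--
--         else :
--             left = a[i]
--
--
--
--     return answer
-- ===== SOURCE B (Python) =====
-- def solution(a):
--     first = a[0]
--     last = a[len(a)-1]
--     stack = [first]          # monotonic stack: values increasing bottom-to-top
--     counted = 0
--     for x in a[1:-1]:
--         while stack and stack[-1] >= x: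
--             stack.pop()
--         if stack:            # some earlier element is strictly smaller than x
--             counted += 1
--         stack.append(x)
--     return 2 + counted
-- ===== Notes on version B (the rewrite author's own statement) =====
-- stated objective: alternative
-- what changed: A's fused scan that maintains a running minimum 'left' is replaced by the classic previous-smaller-element monotonic stack: pop entries >= x, count x when the stack is non-empty (some earlier element is strictly smaller), push x.
import Mathlib
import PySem

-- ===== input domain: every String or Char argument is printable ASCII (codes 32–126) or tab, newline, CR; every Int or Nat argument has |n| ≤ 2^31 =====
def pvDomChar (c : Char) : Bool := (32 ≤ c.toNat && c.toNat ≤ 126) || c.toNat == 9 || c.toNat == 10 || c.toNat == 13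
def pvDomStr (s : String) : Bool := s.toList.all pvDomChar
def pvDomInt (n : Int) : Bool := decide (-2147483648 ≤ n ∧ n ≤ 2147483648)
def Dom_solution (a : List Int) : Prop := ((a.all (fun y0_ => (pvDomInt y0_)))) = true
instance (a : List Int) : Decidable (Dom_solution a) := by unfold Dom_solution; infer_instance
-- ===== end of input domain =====

-- B replaces A's running-minimum scan by a previous-smaller-element monotonic stack; objective: alternative (same cost, different data structure).

-- ===== PORT A =====
def solution (a : List Int) : Int :=
  let answer : Int := 2
  let left := PySem.List.pyGetD a 0 0
  let _right := PySem.List.pyGetD a ((a.length : Int) - 1) 0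
  let st := (PySem.List.pyRange 1 ((a.length : Int) - 1) 1).foldl
      (fun (s : Int × Int) i =>
        if s.2 < PySem.List.pyGetD a i 0 then (s.1 + 1, s.2)
        else (s.1, PySem.List.pyGetD a i 0))
      (answer, left)
  st.1

-- ===== PORT B =====
-- Source B's 'while stack and stack[-1] >= x: stack.pop()' (Python list: append/pop at the END)
def popGe (stk : List Int) (x : Int) : List Int :=
  if h : stk = [] then stk
  else if stk.getLast h ≥ x then popGe stk.dropLast x
  else stk
termination_by stk.length
decreasing_by
  have := List.length_pos_iff.mpr h
  simp only [List.length_dropLast]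
  omega

def solution_alt (a : List Int) : Int :=
  let first := PySem.List.pyGetD a 0 0
  let _last := PySem.List.pyGetD a ((a.length : Int) - 1) 0
  let st := (PySem.List.slice a (some 1) (some (-1))).foldl
      (fun (s : Int × List Int) x =>
        let stk := popGe s.2 x
        (if stk.isEmpty then s.1 else s.1 + 1, stk ++ [x]))
      (0, [first])
  2 + st.1

-- ===== PRECONDITION & SPEC =====
-- A raises IndexError on the empty list (reading a[0]); excluded (B raises there too).
def Pre_solution (a : List Int) : Prop := a ≠ []
instance (a : List Int) : Decidable (Pre_solution a) := by unfold Pre_solution; infer_instance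
def pvWitness_solution : List Int := [3, 1, 2]

def Spec_solution (a : List Int) (out : Int) : Prop := out = solution_alt a
instance (a : List Int) (out : Int) : Decidable (Spec_solution a out) := by unfold Spec_solution; infer_instance

-- ===== CLAIM (what is proved, stated in full; the proofs are below) =====
def Claim_equal_solution : Prop := ∀ (a : List Int), Dom_solution a → Pre_solution a → Spec_solution a (solution a)

-- ===== LEMMAS AND PROOFS =====

-- popping from the END of the stack is dropWhile on its reverse
lemma popGe_eq (x : Int) : ∀ (n : Nat) (stk : List Int), stk.length ≤ n →
    popGe stk x = (stk.reverse.dropWhile (fun y => decide (x ≤ y))).reverse := by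
  intro n
  induction n with
  | zero =>
    intro stk h
    have hnil : stk = [] := List.eq_nil_of_length_eq_zero (Nat.le_zero.mp h)
    subst hnil; simp [popGe]
  | succ n ih =>
    intro stk h
    by_cases hs : stk = []
    · subst hs; simp [popGe]
    · rw [popGe, dif_neg hs]
      have hrev : stk.reverse = stk.getLast hs :: stk.dropLast.reverse := by
        conv_lhs => rw [← List.dropLast_append_getLast hs]
        simp
      by_cases hge : stk.getLast hs ≥ x
      · rw [if_pos hge,
          ih stk.dropLast (by
            have := List.length_pos_iff.mpr hs
            simp only [List.length_dropLast]; omega)]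
        rw [hrev, List.dropWhile_cons]
        simp only [decide_eq_true_eq, hge, if_pos]
      · rw [if_neg hge, hrev, List.dropWhile_cons]
        have hdec : decide (x ≤ stk.getLast hs) = false := by
          simp only [decide_eq_false_iff_not]; omega
        rw [hdec]
        simp only [Bool.false_eq_true, if_false]
        rw [← hrev, List.reverse_reverse]

lemma dropWhile_subsume (p q : Int → Bool) (hpq : ∀ y, q y = true → p y = true) :
    ∀ l : List Int, (l.dropWhile q).dropWhile p = l.dropWhile p := by
  intro l
  induction l with
  | nil => rfl
  | cons a t ih =>
    by_cases hq : q a = true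
    · rw [List.dropWhile_cons_of_pos hq, List.dropWhile_cons_of_pos (hpq a hq), ih]
    · rw [List.dropWhile_cons_of_neg hq]

-- A's (count, running-min) loop equals B's (count, stack) loop, given that the stack's
-- pop-until-smaller test is exactly 'running min < x'
lemma stack_core : ∀ (l stk : List Int) (m c : Int),
    (∀ v : Int, stk.reverse.dropWhile (fun y => decide (v ≤ y)) ≠ [] ↔ m < v) →
    (l.foldl (fun (s : Int × Int) x => if s.2 < x then (s.1 + 1, s.2) else (s.1, x)) (c, m)).1
      = (l.foldl (fun (s : Int × List Int) x =>
          let stk' := popGe s.2 x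
          (if stk'.isEmpty then s.1 else s.1 + 1, stk' ++ [x])) (c, stk)).1 := by
  intro l
  induction l with
  | nil => intro stk m c _; rfl
  | cons x xs ih =>
    intro stk m c hinv
    simp only [List.foldl_cons]
    rw [popGe_eq x stk.length stk (le_refl _)]
    set rest := stk.reverse.dropWhile (fun y => decide (x ≤ y)) with hrest
    have hinv' : ∀ v : Int,
        (rest.reverse ++ [x]).reverse.dropWhile (fun y => decide (v ≤ y)) ≠ [] ↔
          (if m < x then m else x) < v := by
      intro v
      rw [List.reverse_append, List.reverse_reverse]
      simp only [List.reverse_cons, List.reverse_nil, List.nil_append, List.singleton_append]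
      by_cases hvx : v ≤ x
      · rw [List.dropWhile_cons_of_pos (by simpa using hvx), hrest,
          dropWhile_subsume _ _ (fun y hy => by simp at hy ⊢; omega)]
        rw [hinv v]
        by_cases hx : m < x
        · rw [if_pos hx]
        · rw [if_neg hx]; omega
      · rw [List.dropWhile_cons_of_neg (by simpa using hvx)]
        simp only [ne_eq, List.cons_ne_nil, not_false_eq_true, true_iff]
        by_cases hx : m < x
        · rw [if_pos hx]; omega
        · rw [if_neg hx]; omega
    by_cases hx : m < x
    · have hne : rest ≠ [] := (hinv x).mpr hx
      have hemp : (rest.reverse).isEmpty = false := by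
        simp [hne]
      simp only [if_pos hx, hemp, Bool.false_eq_true, if_false]
      rw [ih (rest.reverse ++ [x]) m (c + 1) (by simpa [hx] using hinv')]
    · have hnil : rest = [] := by
        by_contra hne
        exact hx ((hinv x).mp hne)
      have hemp : (rest.reverse).isEmpty = true := by simp [hnil]
      simp only [if_neg hx, hemp, if_true]
      rw [ih (rest.reverse ++ [x]) x c (by simpa [hx] using hinv')]

-- the stack loop's counter is additive in its start value
lemma Bfold_shift : ∀ (l stk : List Int) (c : Int),
    (l.foldl (fun (s : Int × List Int) x =>
        let stk' := popGe s.2 x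
        (if stk'.isEmpty then s.1 else s.1 + 1, stk' ++ [x])) (c, stk)).1
      = c + (l.foldl (fun (s : Int × List Int) x =>
          let stk' := popGe s.2 x
          (if stk'.isEmpty then s.1 else s.1 + 1, stk' ++ [x])) (0, stk)).1 := by
  intro l
  induction l with
  | nil => intro stk c; simp
  | cons x xs ih =>
    intro stk c
    simp only [List.foldl_cons]
    by_cases hb : (popGe stk x).isEmpty = true
    · simp only [hb, if_true]
      exact ih (popGe stk x ++ [x]) c
    · simp only [hb, Bool.false_eq_true, if_false]
      rw [ih (popGe stk x ++ [x]) (c + 1), ih (popGe stk x ++ [x]) (0 + 1)]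
      ring

-- the slice a[1:-1] is the dropLast of the tail
lemma slice_one_neg_one (a0 : Int) (t : List Int) :
    PySem.List.slice (a0 :: t) (some 1) (some (-1)) = t.dropLast := by
  simp [PySem.List.slice, PySem.List.clampIdx, List.dropLast_eq_take]
  split_ifs <;> omega

-- a for-loop over range(m, m+k) reading a[i] is a fold over the corresponding sublist
lemma foldl_range_getD {σ : Type} (a : List Int) (f : σ → Int → σ) :
    ∀ (k : Nat) (m : Nat) (init : σ), (m : Int) + k ≤ a.length →
    (PySem.List.pyRange m ((m : Int) + k) 1).foldl
        (fun s i => f s (PySem.List.pyGetD a i 0)) init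
      = ((a.drop m).take k).foldl f init := by
  intro k
  induction k with
  | zero => intro m init h; simp [PySem.List.pyRange_one_eq_nil]
  | succ k ih =>
    intro m init h
    have hm : (m : Int) < (m : Int) + (k + 1 : Nat) := by push_cast; omega
    rw [PySem.List.pyRange_one_cons hm]
    have hmlen : m < a.length := by push_cast at h ⊢; omega
    have hget : PySem.List.pyGetD a (m : Int) 0 = a[m] := by
      rw [PySem.List.pyGetD_natCast]; exact List.getD_eq_getElem a 0 hmlen
    have hdrop : a.drop m = a[m] :: a.drop (m + 1) := List.drop_eq_getElem_cons hmlen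
    rw [List.foldl_cons, hget, hdrop, List.take_succ_cons, List.foldl_cons]
    have hb : ((m : Int) + (k + 1 : Nat)) = ((m + 1 : Nat) : Int) + k := by push_cast; ring
    rw [hb, show ((m : Int) + 1) = ((m + 1 : Nat) : Int) by push_cast; ring]
    exact ih (m + 1) (f init a[m]) (by push_cast at h ⊢; omega)

-- ===== VERDICT (by name: the statement is the Claim_ definition above) =====
theorem solution_spec : Claim_equal_solution := by
  intro a _hdom hpre
  unfold Spec_solution solution solution_alt
  obtain ⟨a0, t, rfl⟩ : ∃ a0 t, a = a0 :: t := by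
    cases a with
    | nil => exact absurd rfl hpre
    | cons x xs => exact ⟨x, xs, rfl⟩
  simp only [PySem.List.pyGetD_zero_cons, slice_one_neg_one]
  set a := a0 :: t with ha
  have hinv0 : ∀ v : Int,
      ([a0] : List Int).reverse.dropWhile (fun y => decide (v ≤ y)) ≠ [] ↔ a0 < v := by
    intro v
    by_cases hv : v ≤ a0
    · simp [hv]
    · simp [hv]; omega
  cases t with
  | nil =>
    simp [ha, PySem.List.pyRange_one_eq_nil]
  | cons y ys =>
    have hk' : ((a.length : Int) - 1) = 1 + (ys.length : Int) := by
      simp only [ha, List.length_cons]; push_cast; ring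
    rw [hk']
    have hbound : ((1 : Nat) : Int) + (ys.length : Nat) ≤ a.length := by
      simp only [ha, List.length_cons]; push_cast; omega
    have hA := foldl_range_getD a
      (fun (s : Int × Int) x => if s.2 < x then (s.1 + 1, s.2) else (s.1, x))
      ys.length 1 (2, a0) hbound
    simp only [Nat.cast_one] at hA
    rw [hA]
    have hdl : (y :: ys).dropLast = (a.drop 1).take ys.length := by
      simp [ha, List.dropLast_eq_take]
    rw [hdl, stack_core ((a.drop 1).take ys.length) [a0] a0 2 hinv0,
      Bfold_shift ((a.drop 1).take ys.length) [a0] 2]
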